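-- pv_equiv track=rewrite | github.com/Parthi10/hackerrank | algorithm/challenges/subset-component5.py | connectedCompInOneDigit
-- ===== SOURCE A (Python) =====
-- def connectedCompInOneDigit(digit):
--     ret = 0
--     for i in range(64):
--         if digit & 1<<i:
--             ret += 1
--     if ret==1:
--         return 0
--     return ret
-- ===== SOURCE B (Python) =====
-- def connectedCompInOneDigit(digit):
--     # Kernighan's bit-clearing loop over the low-64-bit window (same window A scans).
--     m = digit & ((1 << 64) - 1)
--     ret = 0
--     while m:
--         m &= m - 1
--         ret += 1
--     return 0 if ret == 1 else ret
-- ===== Notes on version B (the rewrite author's own statement) =====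
-- stated objective: alternative
-- what changed: Replaces the fixed scan of all 64 bit positions with Kernighan's m &= m-1 loop over the 64-bit-masked value, iterating once per set bit instead of once per position.
import Mathlib
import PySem

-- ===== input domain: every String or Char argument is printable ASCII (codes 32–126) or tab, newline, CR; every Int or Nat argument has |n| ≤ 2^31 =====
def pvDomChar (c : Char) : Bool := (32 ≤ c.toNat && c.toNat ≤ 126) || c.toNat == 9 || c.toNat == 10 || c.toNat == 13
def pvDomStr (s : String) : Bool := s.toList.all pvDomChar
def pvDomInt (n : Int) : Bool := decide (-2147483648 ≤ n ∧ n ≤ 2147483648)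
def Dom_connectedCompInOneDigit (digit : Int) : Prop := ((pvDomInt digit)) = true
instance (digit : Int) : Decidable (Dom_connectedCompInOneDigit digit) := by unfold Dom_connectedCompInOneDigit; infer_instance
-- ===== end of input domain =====

-- B replaces A's scan of all 64 bit positions by Kernighan's m &= m-1 loop over the
-- 64-bit-masked value (one iteration per set bit); same result, alternative algorithm.


-- ===== PORT A =====
-- 'if digit & 1<<i:' is Python truthiness: the value is nonzero; the loop index i of
-- range(64) is nonnegative, so 'i.toNat' is exact for Python's '1 << i'.
def connectedCompInOneDigit (digit : Int) : Int :=
  let ret : Int := (PySem.List.pyRange 0 64 1).foldl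
    (fun ret i => if PySem.Int.band digit (1 <<< i.toNat) ≠ 0 then ret + 1 else ret) 0
  if ret = 1 then 0 else ret

-- ===== PORT B =====
-- 'while m: m &= m-1; ret += 1' of Source B; m = digit & ((1<<64)-1) is nonnegative
-- (its second operand is), so running the loop on m.toNat is exact.
def kernighanLoop (m : Nat) : Int :=
  if m = 0 then 0 else kernighanLoop (m &&& (m - 1)) + 1
termination_by m
decreasing_by exact Nat.lt_of_le_of_lt Nat.and_le_right (by omega)

def connectedCompInOneDigit_alt (digit : Int) : Int :=
  let m : Int := PySem.Int.band digit ((1 <<< (64 : Nat)) - 1)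
  let ret : Int := kernighanLoop m.toNat
  if ret = 1 then 0 else ret

-- ===== PRECONDITION & SPEC =====
def Spec_connectedCompInOneDigit (digit : Int) (out : Int) : Prop := out = connectedCompInOneDigit_alt digit
instance (digit : Int) (out : Int) : Decidable (Spec_connectedCompInOneDigit digit out) := by unfold Spec_connectedCompInOneDigit; infer_instance

-- ===== CLAIM (what is proved, stated in full; the proofs are below) =====
def Claim_equal_connectedCompInOneDigit : Prop := ∀ (digit : Int), Dom_connectedCompInOneDigit digit → Spec_connectedCompInOneDigit digit (connectedCompInOneDigit digit)

-- ===== LEMMAS AND PROOFS =====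

-- clearing the lowest set bit of an odd number yields its predecessor
theorem land_pred_odd (m : Nat) (h : m % 2 = 1) : m &&& (m - 1) = m - 1 := by
  apply Nat.eq_of_testBit_eq
  intro i
  rw [Nat.testBit_and]
  cases i with
  | zero =>
      have h0 : ¬ (m - 1) % 2 = 1 := by omega
      simp [Nat.testBit_zero, h0]
  | succ i =>
      have hd : (m - 1) / 2 = m / 2 := by omega
      simp [Nat.testBit_succ, hd]

-- clearing the lowest set bit of a positive even number happens in the upper bits
theorem land_pred_even (m : Nat) (h : m % 2 = 0) (h0 : m ≠ 0) :
    m &&& (m - 1) = 2 * ((m / 2) &&& (m / 2 - 1)) := by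
  apply Nat.eq_of_testBit_eq
  intro i
  rw [Nat.testBit_and]
  cases i with
  | zero =>
      have hm0 : ¬ m % 2 = 1 := by omega
      have h20 : ¬ (2 * (m / 2 &&& (m / 2 - 1))) % 2 = 1 := by omega
      simp [Nat.testBit_zero, hm0]
  | succ i =>
      have hd : (m - 1) / 2 = m / 2 - 1 := by omega
      have hd2 : (2 * (m / 2 &&& (m / 2 - 1))) / 2 = m / 2 &&& (m / 2 - 1) := by omega
      simp [Nat.testBit_succ, Nat.testBit_and, hd, hd2]

-- bitCount of 2*j equals bitCount of j
theorem bitCount_double (j : Nat) :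
    PySem.Int.bitCount ((2 * j : Nat) : Int) = PySem.Int.bitCount (j : Int) := by
  rcases Nat.eq_zero_or_pos j with rfl | hj
  · simp
  · have h : 0 < 2 * j := by omega
    rw [PySem.Int.bitCount_natCast h]
    have h1 : 2 * j % 2 = 0 := by omega
    have h2 : 2 * j / 2 = j := by omega
    rw [h1, h2]
    omega

-- clearing the lowest set bit removes exactly one from the population count
theorem bitCount_land_pred (m : Nat) (h : m ≠ 0) :
    PySem.Int.bitCount (m : Int) = PySem.Int.bitCount ((m &&& (m - 1) : Nat) : Int) + 1 := by
  induction m using Nat.strong_induction_on with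
  | _ m ih =>
    rcases Nat.mod_two_eq_zero_or_one m with he | ho
    · rw [land_pred_even m he h, bitCount_double]
      have hk : m / 2 ≠ 0 := by omega
      have hlt : m / 2 < m := by omega
      have hrec := ih (m / 2) hlt hk
      have hbm : PySem.Int.bitCount (m : Int) = PySem.Int.bitCount ((m / 2 : Nat) : Int) := by
        rw [PySem.Int.bitCount_natCast (by omega : 0 < m), he]
        omega
      omega
    · rw [land_pred_odd m ho]
      rw [PySem.Int.bitCount_natCast (by omega : 0 < m), ho]
      rcases Nat.eq_zero_or_pos (m - 1) with hz | hp
      · rw [hz]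
        have hq : m / 2 = 0 := by omega
        rw [hq]
        omega
      · rw [PySem.Int.bitCount_natCast hp]
        have h1 : (m - 1) % 2 = 0 := by omega
        have h2 : (m - 1) / 2 = m / 2 := by omega
        rw [h1, h2]
        omega

-- Kernighan's loop computes the population count
theorem kernighanLoop_eq_bitCount (m : Nat) :
    kernighanLoop m = (PySem.Int.bitCount (m : Int) : Int) := by
  induction m using Nat.strong_induction_on with
  | _ m ih =>
    rw [kernighanLoop]
    rcases eq_or_ne m 0 with rfl | h
    · simp
    · rw [if_neg h]
      have hlt : m &&& (m - 1) < m :=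
        Nat.lt_of_le_of_lt Nat.and_le_right (by omega)
      rw [ih _ hlt, bitCount_land_pred m h]
      push_cast
      ring

-- accumulator shift for the counting fold
theorem foldl_count_shift (p : Nat → Bool) (l : List Nat) (c : Int) :
    l.foldl (fun r i => if p i then r + 1 else r) c
      = c + l.foldl (fun r i => if p i then r + 1 else r) 0 := by
  induction l generalizing c with
  | nil => simp
  | cons x xs ih =>
      simp only [List.foldl_cons]
      rw [ih, ih (if p x then 0 + 1 else 0)]
      split_ifs <;> ring

-- the positional scan over range k counts the bits of any n < 2^k
theorem range_fold_bitCount (k : Nat) : ∀ n : Nat, n < 2 ^ k →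
    (List.range k).foldl (fun r i => if n.testBit i then r + 1 else r) (0 : Int)
      = (PySem.Int.bitCount (n : Int) : Int) := by
  induction k with
  | zero =>
      intro n hn
      have h0 : n = 0 := by omega
      subst h0
      simp
  | succ k ih =>
      intro n hn
      rw [List.range_succ_eq_map, List.foldl_cons, List.foldl_map]
      have hstep : ∀ (r : Int), ∀ i ∈ List.range k,
          (fun (r : Int) (i : Nat) => if n.testBit (Nat.succ i) then r + 1 else r) r i
            = (fun (r : Int) (i : Nat) => if (n / 2).testBit i then r + 1 else r) r i := by
        intro r i _
        simp only [Nat.testBit_succ]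
      rw [PySem.List.foldl_congr_mem _ _ _ _ hstep]
      rw [foldl_count_shift]
      have hn2 : n / 2 < 2 ^ k := by
        have hpow : 2 ^ (k + 1) = 2 * 2 ^ k := by ring
        omega
      rw [ih (n / 2) hn2]
      rcases Nat.eq_zero_or_pos n with rfl | hp
      · simp
      · rw [PySem.Int.bitCount_natCast hp]
        rcases Nat.mod_two_eq_zero_or_one n with h | h
        · have hb : n.testBit 0 = false := by simp [Nat.testBit_zero, h]
          rw [hb, h]
          simp
        · have hb : n.testBit 0 = true := by simp [Nat.testBit_zero, h]
          rw [hb, h]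
          simp only [if_true]
          push_cast
          ring

-- bits of the masked complement: (2^k - 1 - c) has the flipped low bits of c
theorem testBit_mask_sub (i : Nat) : ∀ k c : Nat, c < 2 ^ k → i < k →
    (2 ^ k - 1 - c).testBit i = !c.testBit i := by
  induction i with
  | zero =>
      intro k c hc hik
      have hk2 : 2 ^ k % 2 = 0 := by
        have hdvd : (2 : Nat) ∣ 2 ^ k := dvd_pow_self 2 (by omega)
        omega
      rcases Nat.mod_two_eq_zero_or_one c with h | h
      · have hv : (2 ^ k - 1 - c) % 2 = 1 := by omega
        simp [Nat.testBit_zero, h, hv]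
      · have hv : ¬ (2 ^ k - 1 - c) % 2 = 1 := by omega
        simp [Nat.testBit_zero, h, hv]
  | succ i ih =>
      intro k c hc hik
      rw [Nat.testBit_succ, Nat.testBit_succ]
      have hk2 : 2 ^ k = 2 * 2 ^ (k - 1) := by
        conv_lhs => rw [show k = (k - 1) + 1 by omega, pow_succ]
        ring
      have hdiv : (2 ^ k - 1 - c) / 2 = 2 ^ (k - 1) - 1 - c / 2 := by omega
      rw [hdiv]
      exact ih (k - 1) (c / 2) (by omega) (by omega)

-- the 64-bit mask as a natural-number cast
theorem mask_eq_natCast : (((1 <<< 64 : Nat) : Int)) - 1 = ((2 ^ 64 - 1 : Nat) : Int) := by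
  rw [Nat.one_shiftLeft]
  have h : (1 : Nat) ≤ 2 ^ 64 := Nat.one_le_two_pow
  push_cast [h]

-- negative operand: band through the two's-complement branch
theorem band_neg_eq (digit : Int) (hd : ¬ 0 ≤ digit) (b : Nat) :
    PySem.Int.band digit (b : Int) = ((b - (b &&& (-digit - 1).toNat) : Nat) : Int) := by
  simp [PySem.Int.band, hd, Int.toNat_natCast]

-- the masked value, as a natural number
theorem masked_toNat (digit : Int) (hsmall : (-digit - 1).toNat < 2 ^ 64) :
    (PySem.Int.band digit (((1 <<< 64 : Nat) : Int) - 1)).toNat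
      = if 0 ≤ digit then digit.toNat % 2 ^ 64 else 2 ^ 64 - 1 - (-digit - 1).toNat := by
  rw [mask_eq_natCast]
  by_cases hd : 0 ≤ digit
  · rw [if_pos hd, PySem.Int.band_of_nonneg hd (Int.natCast_nonneg _)]
    rw [Int.toNat_natCast, Int.toNat_natCast, Nat.and_two_pow_sub_one_eq_mod]
  · rw [if_neg hd, band_neg_eq digit hd, Int.toNat_natCast, Nat.and_comm,
        Nat.and_two_pow_sub_one_eq_mod, Nat.mod_eq_of_lt hsmall]

-- the masked value is below 2^64
theorem masked_lt (digit : Int) (hsmall : (-digit - 1).toNat < 2 ^ 64) :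
    (PySem.Int.band digit (((1 <<< 64 : Nat) : Int) - 1)).toNat < 2 ^ 64 := by
  rw [masked_toNat digit hsmall]
  split_ifs
  · exact Nat.mod_lt _ (by positivity)
  · omega

-- A's per-bit test agrees with the bits of the masked value, for either sign
theorem band_bit_char (digit : Int) (k : Nat) (hk : k < 64)
    (hsmall : (-digit - 1).toNat < 2 ^ 64) :
    (PySem.Int.band digit ((1 <<< k : Nat) : Int) ≠ 0)
      ↔ (PySem.Int.band digit (((1 <<< 64 : Nat) : Int) - 1)).toNat.testBit k = true := by
  rw [masked_toNat digit hsmall, Nat.one_shiftLeft]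
  by_cases hd : 0 ≤ digit
  · rw [if_pos hd, PySem.Int.band_of_nonneg hd (Int.natCast_nonneg _)]
    rw [Int.toNat_natCast, Ne, Int.natCast_eq_zero, Nat.and_two_pow,
        Nat.testBit_mod_two_pow]
    cases hbit : digit.toNat.testBit k with
    | false => simp
    | true => simp [hk]
  · rw [if_neg hd, band_neg_eq digit hd]
    rw [Ne, Int.natCast_eq_zero, Nat.two_pow_and,
        testBit_mask_sub k 64 ((-digit - 1).toNat) hsmall hk]
    cases hbit : (-digit - 1).toNat.testBit k with
    | false => simp
    | true => simp

-- ===== VERDICT (by name: the statement is the Claim_ definition above) =====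
theorem connectedCompInOneDigit_spec : Claim_equal_connectedCompInOneDigit := by
  intro digit hdom
  unfold Spec_connectedCompInOneDigit
  have hbounds : -2147483648 ≤ digit ∧ digit ≤ 2147483648 := by
    have h := hdom
    unfold Dom_connectedCompInOneDigit pvDomInt at h
    exact of_decide_eq_true h
  have hsmall : (-digit - 1).toNat < 2 ^ 64 := by
    have h64 : (2147483648 : Nat) < 2 ^ 64 := by norm_num
    omega
  unfold connectedCompInOneDigit connectedCompInOneDigit_alt
  have hfold :
      (PySem.List.pyRange 0 64 1).foldl
        (fun ret i => if PySem.Int.band digit (1 <<< i.toNat) ≠ 0 then ret + 1 else ret) (0 : Int)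
        = kernighanLoop (PySem.Int.band digit (((1 <<< 64 : Nat) : Int) - 1)).toNat := by
    have h1 : PySem.List.pyRange 0 64 1 = (List.range 64).map (fun k : Nat => (k : Int)) := by
      rw [PySem.List.pyRange_one]
      norm_num
      simp only [show Int.toNat 64 = 64 from rfl]
    rw [h1, List.foldl_map]
    have hstep : ∀ (r : Int), ∀ k ∈ List.range 64,
        (fun (r : Int) (k : Nat) =>
          if PySem.Int.band digit (1 <<< ((k : Int)).toNat) ≠ 0 then r + 1 else r) r k
          = (fun (r : Int) (k : Nat) =>
              if (PySem.Int.band digit (((1 <<< 64 : Nat) : Int) - 1)).toNat.testBit k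
              then r + 1 else r) r k := by
      intro r k hkmem
      have hk : k < 64 := List.mem_range.mp hkmem
      have hiff := band_bit_char digit k hk hsmall
      simp only [Int.toNat_natCast]
      by_cases hb : (PySem.Int.band digit (((1 <<< 64 : Nat) : Int) - 1)).toNat.testBit k = true
      · rw [if_pos (hiff.mpr hb), if_pos hb]
      · rw [if_neg (fun hh => hb (hiff.mp hh)), if_neg hb]
    rw [PySem.List.foldl_congr_mem _ _ _ _ hstep]
    rw [range_fold_bitCount 64 _ (masked_lt digit hsmall)]
    rw [kernighanLoop_eq_bitCount]
  rw [hfold]
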